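-- pv_equiv track=rewrite | github.com/z2oh/fall2017codeathon | periodic/python/main.py | count
-- ===== SOURCE A (Python) =====
-- elem_sort = ['ac', 'ag', 'al', 'am', 'ar', 'as', 'at', 'au', 'b', 'ba', 'be', 'bh', 'bi', 'bk', 'br', 'c', 'ca', 'cd', 'ce', 'cf', 'cl', 'cm', 'cn', 'co', 'cr', 'cs', 'cu', 'db', 'ds', 'dy', 'er', 'es', 'eu', 'f', 'fe', 'fl', 'fm', 'fr', 'ga', 'gd', 'ge', 'h', 'he', 'hf', 'hg', 'ho', 'hs', 'i', 'in', 'ir', 'k', 'kr', 'la', 'li', 'lr', 'lu', 'lv', 'mc', 'md', 'mg', 'mn', 'mo', 'mt', 'n', 'na', 'nb', 'nd', 'ne', 'nh', 'ni', 'no', 'np', 'o', 'og', 'os', 'p', 'pa', 'pb', 'pd', 'pm', 'po', 'pr', 'pt', 'pu', 'ra', 'rb', 're', 'rf', 'rg', 'rh', 'rn', 'ru', 's', 'sb', 'sc', 'se', 'sg', 'si', 'sm', 'sn', 'sr', 'ta', 'tb', 'tc', 'te', 'th', 'ti', 'tl', 'tm', 'ts', 'u', 'v', 'w', 'xe', 'y',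 'yb', 'zn', 'zr']
--
-- def is_elem(st):
--     return st in elem_sort
--
-- def count(word):
--     num = 0
--     if len(word) == 1:
--         if(is_elem(word)):
--             num += 1
--     elif len(word) == 2:
--         if is_elem(word):
--             num += 1
--         if is_elem(word[0]) and is_elem(word[1]):
--             num += 1
--     else:
--         digraph = word[-2] + word[-1]
--         single = word[-1]
--         if is_elem(digraph):
--             num += count(word[0:-2])
--         if is_elem(single):
--             num += count(word[0:-1])
--     return num
-- ===== SOURCE B (Python) =====
-- # Linear DP over prefixes with two rolling counts; element symbols split by
-- # length into a singles string and a doubles set (no shared table with A).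
-- _SINGLES = set("bcfhiknopsuvwy")
-- _DOUBLES = set(['ac', 'ag', 'al', 'am', 'ar', 'as', 'at', 'au', 'ba', 'be',
--     'bh', 'bi', 'bk', 'br', 'ca', 'cd', 'ce', 'cf', 'cl', 'cm', 'cn', 'co',
--     'cr', 'cs', 'cu', 'db', 'ds', 'dy', 'er', 'es', 'eu', 'fe', 'fl', 'fm',
--     'fr', 'ga', 'gd', 'ge', 'he', 'hf', 'hg', 'ho', 'hs', 'in', 'ir', 'kr',
--     'la', 'li', 'lr', 'lu', 'lv', 'mc', 'md', 'mg', 'mn', 'mo', 'mt', 'na',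
--     'nb', 'nd', 'ne', 'nh', 'ni', 'no', 'np', 'og', 'os', 'pa', 'pb', 'pd',
--     'pm', 'po', 'pr', 'pt', 'pu', 'ra', 'rb', 're', 'rf', 'rg', 'rh', 'rn',
--     'ru', 'sb', 'sc', 'se', 'sg', 'si', 'sm', 'sn', 'sr', 'ta', 'tb', 'tc',
--     'te', 'th', 'ti', 'tl', 'tm', 'ts', 'xe', 'yb', 'zn', 'zr'])
--
-- def count(word):
--     # dp1 = segmentations of the prefix read so far, dp2 = one char shorter.
--     prev = None
--     dp2, dp1 = 0, 1
--     for c in word: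
--         t = dp1 if c in _SINGLES else 0
--         if prev is not None and prev + c in _DOUBLES:
--             t += dp2
--         prev, dp2, dp1 = c, dp1, t
--     return dp1
-- ===== Notes on version B (the rewrite author's own statement) =====
-- stated objective: faster
-- what changed: Replaced A's branching recursion on suffixes (exponential) by a single left-to-right pass keeping two rolling DP counts (segmentations of the current prefix and the one-shorter prefix), with the symbol table split by length into a singles set and a doubles set for O(1) lookup.
import Mathlib
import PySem

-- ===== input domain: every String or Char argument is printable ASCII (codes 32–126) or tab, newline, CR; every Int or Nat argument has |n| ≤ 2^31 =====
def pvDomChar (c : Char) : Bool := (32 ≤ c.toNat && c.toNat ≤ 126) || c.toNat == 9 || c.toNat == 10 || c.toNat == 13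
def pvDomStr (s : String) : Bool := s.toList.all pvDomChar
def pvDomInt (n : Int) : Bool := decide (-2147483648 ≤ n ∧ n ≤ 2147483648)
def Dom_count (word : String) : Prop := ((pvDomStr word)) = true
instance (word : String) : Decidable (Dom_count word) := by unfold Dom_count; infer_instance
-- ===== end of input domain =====

-- B replaces A's branching recursion on suffixes by one linear left-to-right DP pass
-- with two rolling counts and its own symbol tables split by length (objective: faster).

-- ===== PORT A =====
-- the element symbols, as lists of chars
def elemSort : List (List Char) :=
  [['a','c'],['a','g'],['a','l'],['a','m'],['a','r'],['a','s'],['a','t'],['a','u'],['b'],['b','a'],['b','e'],['b','h'],['b','i'],['b','k'],['b','r'],['c'],['c','a'],['c','d'],['c','e'],['c','f'],['c','l'],['c','m'],['c','n'],['c','o'],['c','r'],['c','s'],['c','u'],['d','b'],['d','s'],['d','y'],['e','r'],['e','s'],['e','u'],['f'],['f','e'],['f','l'],['f','m'],['f','r'],['g','a'],['g','d'],['g','e'],['h'],['h','e'],['h','f'],['h','g'],['h','o'],['h','s'],['i'],['i','n'],['i','r'],['k'],['k','r'],['l','a'],['l','i'],['l','r'],['l','u'],['l','v'],['m','c'],[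'm','d'],['m','g'],['m','n'],['m','o'],['m','t'],['n'],['n','a'],['n','b'],['n','d'],['n','e'],['n','h'],['n','i'],['n','o'],['n','p'],['o'],['o','g'],['o','s'],['p'],['p','a'],['p','b'],['p','d'],['p','m'],['p','o'],['p','r'],['p','t'],['p','u'],['r','a'],['r','b'],['r','e'],['r','f'],['r','g'],['r','h'],['r','n'],['r','u'],['s'],['s','b'],['s','c'],['s','e'],['s','g'],['s','i'],['s','m'],['s','n'],['s','r'],['t','a'],['t','b'],['t','c'],['t','e'],['t','h'],['t','i'],['t','l'],['t','m'],['t','s'],['u'],['v'],['w'],['x','e'],['y'],['y','b'],['z','n'],['z','r']]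

-- is_elem(st): st in elem_sort
def isElem (st : List Char) : Bool := elemSort.contains st

-- A's recursion, on the character list of the word.
-- word[0:-2] = take (len-2), word[0:-1] = take (len-1),
-- word[-2]+word[-1] = drop (len-2), word[-1] = drop (len-1)  (exact for len ≥ 3).
def countA (cs : List Char) : Int :=
  if _h1 : cs.length = 1 then
    (if isElem cs then 1 else 0)
  else if h2 : cs.length = 2 then
    (if isElem cs then 1 else 0) +
    (if isElem (cs.take 1) && isElem (cs.drop 1) then 1 else 0)
  else if _h0 : cs.length = 0 then
    0  -- Python raises IndexError here (word[-2] on ''); excluded by Pre_count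
  else
    (if isElem (cs.drop (cs.length - 2)) then countA (cs.take (cs.length - 2)) else 0) +
    (if isElem (cs.drop (cs.length - 1)) then countA (cs.take (cs.length - 1)) else 0)
termination_by cs.length
decreasing_by
  · simp only [List.length_take]; omega
  · simp only [List.length_take]; omega

def count (word : String) : Int := countA word.toList

-- ===== PORT B =====
-- B's own tables: one-letter symbols as a string, two-letter symbols as strings
def singlesB : List Char := "bcfhiknopsuvwy".toList
def doublesB : List String :=
  ["ac","ag","al","am","ar","as","at","au","ba","be","bh","bi","bk","br","ca","cd","ce","cf","cl","cm","cn","co","cr","cs","cu","db","ds","dy","er","es","eu","fe","fl","fm","fr","ga","gd","ge","he","hf","hg","ho","hs","in","ir","kr","la","li","lr","lu","lv","mc","md","mg","mn","mo","mt","na","nb","nd","ne","nh","ni","no","np","og","os","pa","pb","pd","pm","po","pr","pt","pu","ra","rb","re","rf","rg","rh","rn","ru","sb","sc","se","sg","si","sm","sn","sr","ta","tb","tc","te","th","ti","tl","tm","ts","xe","yb","zn","zr"]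

-- one fold step of B's rolling DP: state = (prev char, dp[i-1], dp[i])
def stepB (st : Option Char × Int × Int) (c : Char) : Option Char × Int × Int :=
  let t := (if singlesB.contains c then st.2.2 else 0) +
           (match st.1 with
            | some p => if doublesB.contains (String.ofList [p, c]) then st.2.1 else 0
            | none => 0)
  (some c, st.2.2, t)

def count_alt (word : String) : Int :=
  (word.toList.foldl stepB (none, 0, 1)).2.2

-- ===== PRECONDITION & SPEC =====
-- Pre_ excludes only the empty string, on which A raises IndexError (word[-2]).
def Pre_count (word : String) : Prop := word ≠ ""
instance (word : String) : Decidable (Pre_count word) := by unfold Pre_count; infer_instance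

def pvWitness_count : String := "he"

def Spec_count (word : String) (out : Int) : Prop := out = count_alt word
instance (word : String) (out : Int) : Decidable (Spec_count word out) := by unfold Spec_count; infer_instance

-- ===== CLAIM (what is proved, stated in full; the proofs are below) =====
def Claim_equal_count : Prop := ∀ (word : String), Dom_count word → Pre_count word → Spec_count word (count word)

-- ===== LEMMAS AND PROOFS =====

-- B's tables agree with A's membership test
lemma bridge_single (c : Char) : singlesB.contains c = isElem [c] := by
  simp [singlesB, isElem, elemSort]

lemma str_beq_toList (s t : String) : (s == t) = (s.toList == t.toList) := by
  by_cases h : s = t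
  · subst h; simp
  · have h2 : s.toList ≠ t.toList := fun hh => h (String.toList_inj.mp hh)
    simp [h, h2]

lemma contains_map_toList (ds : List String) (x : String) :
    ds.contains x = (ds.map String.toList).contains x.toList := by
  induction ds with
  | nil => rfl
  | cons a t ih => simp only [List.map_cons, List.contains_cons, ih, str_beq_toList]

-- B's doubles table spells out exactly the two-letter entries of A's table
lemma doubles_eval : doublesB.map String.toList = elemSort.filter (fun l => l.length == 2) := by decide

lemma contains_filter2 (L : List (List Char)) (x : List Char) (hx : x.length = 2) :
    L.contains x = (L.filter (fun l => l.length == 2)).contains x := by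
  induction L with
  | nil => rfl
  | cons a t ih =>
    by_cases h : a.length = 2
    · simp [h, hx]
    · have hxa : x ≠ a := fun hh => h (hh ▸ hx)
      simp [h, hx, hxa]

lemma bridge_double (p c : Char) :
    doublesB.contains (String.ofList [p, c]) = isElem [p, c] := by
  rw [contains_map_toList, doubles_eval, String.toList_ofList,
    ← contains_filter2 _ _ (by simp)]
  rfl

-- G cs = number of segmentations of the prefix cs, with G [] = 1 (what B's dp tracks)
def G (cs : List Char) : Int := if cs = [] then 1 else countA cs

lemma drop_len_sub_one : ∀ (cs : List Char) (h : cs ≠ []), cs.drop (cs.length - 1) = [cs.getLast h] := by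
  intro cs
  induction cs with
  | nil => intro h; simp at h
  | cons a t ih =>
    intro h
    cases t with
    | nil => simp
    | cons b u =>
      have ht : (b :: u) ≠ [] := by simp
      have hl : (a :: b :: u).length - 1 = ((b :: u).length - 1) + 1 := by
        simp [List.length]
      rw [hl]
      simp only [List.drop_succ_cons]
      rw [ih ht]
      simp [List.getLast_cons]

lemma countA_concat (cs : List Char) (c : Char) (h : cs ≠ []) :
    countA (cs ++ [c]) =
      (if isElem [c] then countA cs else 0) +
      (if isElem [cs.getLast h, c] then G cs.dropLast else 0) := by
  rcases Nat.lt_or_ge cs.length 2 with hlt | hge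
  · -- cs has length 1
    have h1 : cs.length = 1 := by
      have := List.length_pos_iff.mpr h; omega
    obtain ⟨a, rfl⟩ := List.length_eq_one_iff.mp h1
    have hA : countA [a] = (if isElem [a] then 1 else 0) := by
      rw [countA.eq_def]; simp
    have hAC : countA [a, c] =
        (if isElem [a, c] then 1 else 0) + (if isElem [a] && isElem [c] then 1 else 0) := by
      rw [countA.eq_def]; simp
    have hcat : ([a] ++ [c] : List Char) = [a, c] := rfl
    rw [hcat, hAC, hA]
    simp only [List.getLast_singleton, List.dropLast_singleton, G, if_pos]
    by_cases hq : isElem [a] <;> by_cases hr : isElem [c] <;> by_cases hp : isElem [a, c] <;>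
      simp [hq, hr, hp]
  · -- cs has length ≥ 2, so cs ++ [c] hits the recursive branch
    have hn : (cs ++ [c]).length = cs.length + 1 := by simp
    rw [countA]
    have e1 : ¬ (cs ++ [c]).length = 1 := by omega
    have e2 : ¬ (cs ++ [c]).length = 2 := by omega
    have e0 : ¬ (cs ++ [c]).length = 0 := by omega
    simp only [e1, e2, e0, dif_neg, not_false_iff]
    have l2 : (cs ++ [c]).length - 2 = cs.length - 1 := by omega
    have l1 : (cs ++ [c]).length - 1 = cs.length := by omega
    rw [l2, l1]
    have d2 : (cs ++ [c]).drop (cs.length - 1) = [cs.getLast h, c] := by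
      rw [List.drop_append_of_le_length (by omega)]
      rw [drop_len_sub_one cs h]; rfl
    have d1 : (cs ++ [c]).drop cs.length = [c] := by simp
    have t2 : (cs ++ [c]).take (cs.length - 1) = cs.dropLast := by
      rw [List.take_append_of_le_length (by omega)]
      rw [List.dropLast_eq_take]
    have t1 : (cs ++ [c]).take cs.length = cs := by simp
    rw [d2, d1, t2, t1]
    have hdl : cs.dropLast ≠ [] := by
      intro hh
      have := congrArg List.length hh
      simp [List.length_dropLast] at this
      omega
    have : G cs.dropLast = countA cs.dropLast := by simp [G, hdl]
    rw [this]
    omega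

lemma fold_inv : ∀ (cs : List Char) (h : cs ≠ []),
    List.foldl stepB (none, 0, 1) cs = (some (cs.getLast h), G cs.dropLast, G cs) := by
  intro cs
  induction cs using List.reverseRecOn with
  | nil => intro h; simp at h
  | append_singleton cs c ih =>
    intro _
    by_cases h : cs = []
    · subst h
      have h1 : countA [c] = (if isElem [c] then 1 else 0) := by
        rw [countA.eq_def]; simp
      simp only [List.nil_append, List.foldl_cons, List.foldl_nil, stepB, bridge_single]
      simp [G, h1]
    · rw [List.foldl_append, ih h]
      simp only [List.foldl_cons, List.foldl_nil, stepB, bridge_single,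
        bridge_double]
      have hG : G cs = countA cs := by simp [G, h]
      rw [List.getLast_concat, List.dropLast_concat]
      have : G (cs ++ [c]) = countA (cs ++ [c]) := by simp [G]
      rw [this, countA_concat cs c h, hG]

lemma toList_ne_nil (word : String) (h : word ≠ "") : word.toList ≠ [] := by
  intro hh
  apply h
  exact String.toList_inj.mp (by simpa using hh)

-- ===== VERDICT (by name: the statement is the Claim_ definition above) =====
theorem count_spec : Claim_equal_count := by
  intro word _ hpre
  unfold Spec_count count count_alt
  have h := toList_ne_nil word hpre
  rw [fold_inv word.toList h]
  simp [G, h]
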